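-- pv_equiv track=rewrite | github.com/binary-0/barrier-free-kiosk | backend/core/langgraph/nodes/rule_based_node.py | _check_missing_options
-- ===== SOURCE A (Python) =====
-- from typing import Dict, Any, List, Callable, Optional, Tuple
--
-- def _check_missing_options(menu: Dict[str, Any], selected_options: List[str]) -> List[str]:
--     missing_options = []
--     required_options = menu.get("required_options", {})
--
--     for option_category, options in required_options.items():
--         category_options = [opt["name"] for opt in options]
--         if not any(opt in selected_options for opt in category_options):
--             missing_options.append(option_category)
--
--     return missing_options
-- ===== SOURCE B (Python) =====
-- from typing import Dict, Any, List
--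
-- def _check_missing_options(menu: Dict[str, Any], selected_options: List[str]) -> List[str]:
--     required_options = menu.get("required_options", {})
--     # reverse index: option name -> list of categories offering it
--     index = {}
--     for category, options in required_options.items():
--         for opt in options:
--             index.setdefault(opt["name"], []).append(category)
--     satisfied = set()
--     for name in selected_options:
--         for category in index.get(name, []):
--             satisfied.add(category)
--     return [category for category in required_options if category not in satisfied]
-- ===== Notes on version B (the rewrite author's own statement) =====
-- stated objective: alternative
-- what changed: Instead of re-scanning selected_options for every required category, B builds a reverse index (option name -> list of categories offering it) in one pass over required_options, marks satisfied categories in a single pass over selected_options, and finally filters the categories in their original order.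
-- outside the precondition, e.g. on _check_missing_options({'required_options': {'size': [{}]}}, []): A raises KeyError, B raises KeyError
import Mathlib
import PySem

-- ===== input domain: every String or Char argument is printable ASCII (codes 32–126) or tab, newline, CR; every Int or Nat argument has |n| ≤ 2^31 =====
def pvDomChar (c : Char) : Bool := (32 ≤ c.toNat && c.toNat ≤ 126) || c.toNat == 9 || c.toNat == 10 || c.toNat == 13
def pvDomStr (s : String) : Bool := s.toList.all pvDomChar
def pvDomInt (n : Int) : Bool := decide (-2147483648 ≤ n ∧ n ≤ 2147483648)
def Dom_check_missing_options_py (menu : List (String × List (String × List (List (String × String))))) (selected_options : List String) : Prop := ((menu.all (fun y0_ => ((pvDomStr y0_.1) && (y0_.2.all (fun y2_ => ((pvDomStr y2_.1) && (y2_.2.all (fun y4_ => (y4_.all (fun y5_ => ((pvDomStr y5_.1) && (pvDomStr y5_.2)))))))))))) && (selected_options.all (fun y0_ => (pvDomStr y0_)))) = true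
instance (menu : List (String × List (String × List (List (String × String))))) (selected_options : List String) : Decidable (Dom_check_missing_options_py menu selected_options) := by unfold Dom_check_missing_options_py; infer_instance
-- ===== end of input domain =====

-- B replaces A's per-category rescan of selected_options by a reverse index (option name → its
-- categories) built once plus one pass over the selections; objective: alternative decomposition.
-- ===== PORT A =====

-- opt["name"] with default "": exact on Pre_, which guarantees the key is present (Python raises KeyError otherwise)
def pvOptName (opt : List (String × String)) : String :=
  (PySem.Dict.ofList opt).getD "name" ""

def check_missing_options_py (menu : List (String × List (String × List (List (String × String))))) (selected_options : List String) : List String :=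
  let required_options := PySem.Dict.ofList ((PySem.Dict.ofList menu).getD "required_options" [])
  required_options.items.foldl
    (fun missing_options p =>
      let category_options := p.2.map (fun opt => pvOptName opt)
      if category_options.any (fun opt => selected_options.contains opt) then missing_options
      else missing_options ++ [p.1])
    []

-- ===== PORT B =====
def check_missing_options_py_alt (menu : List (String × List (String × List (List (String × String))))) (selected_options : List String) : List String :=
  let required_options := PySem.Dict.ofList ((PySem.Dict.ofList menu).getD "required_options" [])
  let index : PySem.Dict String (List String) :=
    required_options.items.foldl
      (fun idx p => p.2.foldl
        (fun idx opt => idx.modify (pvOptName opt) [] (fun cs => cs ++ [p.1])) idx)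
      PySem.Dict.empty
  let satisfied : PySem.Set String :=
    selected_options.foldl (fun s name => (index.getD name []).foldl PySem.Set.add s) PySem.Set.empty
  required_options.keys.filter (fun category => !(PySem.Set.contains satisfied category))

-- ===== PRECONDITION & SPEC =====
-- Pre_ excludes exactly the inputs on which A raises KeyError: some option dict that the loop
-- reads (i.e. in the effective "required_options" mapping) lacks the key "name".
def Pre_check_missing_options_py (menu : List (String × List (String × List (List (String × String))))) (selected_options : List String) : Prop :=
  ∀ p ∈ (PySem.Dict.ofList ((PySem.Dict.ofList menu).getD "required_options" [])).items,
    ∀ opt ∈ p.2, "name" ∈ opt.map (fun kv => kv.1)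
instance (menu : List (String × List (String × List (List (String × String))))) (selected_options : List String) : Decidable (Pre_check_missing_options_py menu selected_options) := by unfold Pre_check_missing_options_py; infer_instance

def pvWitness_check_missing_options_py : (List (String × List (String × List (List (String × String))))) × List String :=
  ([("required_options", [("size", [[("name", "L")], [("name", "M")]]), ("milk", [[("name", "soy")]])])], ["M", "oat"])

def Spec_check_missing_options_py (menu : List (String × List (String × List (List (String × String))))) (selected_options : List String) (out : List String) : Prop := out = check_missing_options_py_alt menu selected_options
instance (menu : List (String × List (String × List (List (String × String))))) (selected_options : List String) (out : List String) : Decidable (Spec_check_missing_options_py menu selected_options out) := by unfold Spec_check_missing_options_py; infer_instance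

-- ===== CLAIM (what is proved, stated in full; the proofs are below) =====
def Claim_equal_check_missing_options_py : Prop := ∀ (menu : List (String × List (String × List (List (String × String))))) (selected_options : List String), Dom_check_missing_options_py menu selected_options → Pre_check_missing_options_py menu selected_options → Spec_check_missing_options_py menu selected_options (check_missing_options_py menu selected_options)

-- ===== LEMMAS AND PROOFS =====

-- all (name, category) pairs the index loop inserts, in insertion order
def pvPairs (l : List (String × List (List (String × String)))) : List (String × String) :=
  l.flatMap (fun q => q.2.map (fun opt => (pvOptName opt, q.1)))

theorem pvBuild_eq_pairs (l : List (String × List (List (String × String))))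
    (d : PySem.Dict String (List String)) :
    l.foldl (fun idx p => p.2.foldl
        (fun idx opt => idx.modify (pvOptName opt) [] (fun cs => cs ++ [p.1])) idx) d
      = (pvPairs l).foldl (fun d p => d.modify p.1 [] (fun x => x ++ [p.2])) d := by
  induction l generalizing d with
  | nil => simp [pvPairs]
  | cons q t ih =>
    simp only [pvPairs, List.flatMap_cons, List.foldl_append, List.foldl_cons, List.foldl_map]
    rw [ih]
    rfl

theorem pvMem_index (l : List (String × List (List (String × String)))) (c name : String) :
    (c ∈ (l.foldl (fun idx p => p.2.foldl
        (fun idx opt => idx.modify (pvOptName opt) [] (fun cs => cs ++ [p.1])) idx)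
        PySem.Dict.empty).getD name [])
      ↔ ∃ q ∈ l, q.1 = c ∧ ∃ opt ∈ q.2, pvOptName opt = name := by
  rw [pvBuild_eq_pairs, PySem.Dict.getD_foldl_modify_append]
  simp only [PySem.Dict.getD_empty, List.nil_append, List.mem_map, List.mem_filter, pvPairs,
    List.mem_flatMap, beq_iff_eq]
  constructor
  · rintro ⟨⟨n, cat⟩, ⟨⟨q, hq, opt, hopt, heq⟩, hname⟩, hc⟩
    cases heq
    exact ⟨q, hq, hc, opt, hopt, hname⟩
  · rintro ⟨q, hq, rfl, opt, hopt, rfl⟩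
    exact ⟨(pvOptName opt, q.1), ⟨⟨q, hq, opt, hopt, rfl⟩, rfl⟩, rfl⟩

theorem pvMem_satisfied (index : PySem.Dict String (List String)) (sel : List String)
    (s : PySem.Set String) (c : String) :
    (c ∈ sel.foldl (fun s name => (index.getD name []).foldl PySem.Set.add s) s)
      ↔ c ∈ s ∨ ∃ name ∈ sel, c ∈ index.getD name [] := by
  induction sel generalizing s with
  | nil => simp
  | cons n t ih =>
    simp only [List.foldl_cons, ih, List.mem_cons]
    rw [PySem.Set.mem_foldl_add (index.getD n []) (fun x => x) s c]
    constructor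
    · rintro (⟨hs | ⟨b, hb, rfl⟩⟩ | ⟨m, hm, hc⟩)
      · exact Or.inl hs
      · exact Or.inr ⟨n, Or.inl rfl, hb⟩
      · exact Or.inr ⟨m, Or.inr hm, hc⟩
    · rintro (hs | ⟨m, (rfl | hm), hc⟩)
      · exact Or.inl (Or.inl hs)
      · exact Or.inl (Or.inr ⟨c, hc, rfl⟩)
      · exact Or.inr ⟨m, hm, hc⟩

-- ===== VERDICT (by name: the statement is the Claim_ definition above) =====
theorem check_missing_options_py_spec : Claim_equal_check_missing_options_py := by
  intro menu selected_options _hdom _hpre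
  unfold Spec_check_missing_options_py check_missing_options_py check_missing_options_py_alt
  dsimp only
  set required_options := PySem.Dict.ofList ((PySem.Dict.ofList menu).getD "required_options" []) with hreq
  set index := required_options.items.foldl
      (fun idx p => p.2.foldl
        (fun idx opt => idx.modify (pvOptName opt) [] (fun cs => cs ++ [p.1])) idx)
      PySem.Dict.empty with hindex
  set satisfied := selected_options.foldl
      (fun s name => (index.getD name []).foldl PySem.Set.add s) PySem.Set.empty with hsat
  -- A's loop is a filter-map
  have hA : required_options.items.foldl
      (fun missing_options p =>
        if (p.2.map (fun opt => pvOptName opt)).any (fun opt => selected_options.contains opt)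
        then missing_options else missing_options ++ [p.1]) []
      = ((required_options.items.filter
          (fun p => !(p.2.map (fun opt => pvOptName opt)).any (fun opt => selected_options.contains opt))).map
          (fun p => p.1)) := by
    have hfun : (fun (missing_options : List String) (p : String × List (List (String × String))) =>
        if (p.2.map (fun opt => pvOptName opt)).any (fun opt => selected_options.contains opt)
        then missing_options else missing_options ++ [p.1])
        = (fun missing_options p =>
            if (!(p.2.map (fun opt => pvOptName opt)).any (fun opt => selected_options.contains opt))
            then missing_options ++ [p.1] else missing_options) := by
      funext acc p
      cases h : (p.2.map (fun opt => pvOptName opt)).any (fun opt => selected_options.contains opt) <;> simp_all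
    rw [hfun, PySem.List.foldl_append_if]
    simp
  rw [hA]
  -- B's keys-filter is the same filter-map
  have hkeys : required_options.keys = required_options.items.map (fun p => p.1) := rfl
  rw [hkeys, List.filter_map]
  have hnd : (required_options.items.map (fun p => p.1)).Nodup := by
    have := PySem.Dict.nodup_keys_ofList ((PySem.Dict.ofList menu).getD "required_options" [])
    simpa [hreq, PySem.Dict.keys] using this
  congr 1
  apply List.filter_congr
  intro p hp
  simp only [Function.comp_apply]
  congr 1
  rw [Bool.eq_iff_iff, List.any_eq_true, PySem.Set.contains_iff, hsat,
    pvMem_satisfied index selected_options PySem.Set.empty p.1]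
  simp only [PySem.Set.empty]
  constructor
  · rintro ⟨n, hn, hc⟩
    simp only [List.mem_map] at hn
    obtain ⟨opt, hopt, rfl⟩ := hn
    refine Or.inr ⟨pvOptName opt, ?_, ?_⟩
    · exact List.mem_of_elem_eq_true hc
    · rw [hindex, pvMem_index]
      exact ⟨p, hp, rfl, opt, hopt, rfl⟩
  · rintro (h | ⟨name, hnm, hc⟩)
    · simp at h
    · rw [hindex, pvMem_index] at hc
      obtain ⟨q, hq, hqc, opt, hopt, rfl⟩ := hc
      have hpq : q = p := List.inj_on_of_nodup_map hnd hq hp hqc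
      subst hpq
      exact ⟨pvOptName opt, List.mem_map_of_mem hopt, List.elem_eq_true_of_mem hnm⟩
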